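-- pv_equiv track=rewrite | github.com/dsjoholm/data-analyses | daskify_rt/download_vehicle_positions.py | determine_batches
-- ===== SOURCE A (Python) =====
-- def determine_batches(rt_names: list) -> dict:
--     #https://stackoverflow.com/questions/4843158/how-to-check-if-a-string-is-a-substring-of-items-in-a-list-of-strings
--     large_operator_names = [
--         "LA Metro Bus",
--         "LA Metro Rail",
--         "AC Transit",
--         "Muni"
--     ]
--
--     # If any of the large operator name substring is
--     # found in our list of names, grab those
--     # be flexible bc "Vehicle Positions" and "VehiclePositions" present
--     matching = [i for i in rt_names
--                 if any(name in i for name in large_operator_names)]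
--     remaining = [i for i in rt_names if i not in matching]
--
--     # For each of the large operators, they will run in query individually,
--     # and batch up the remaining together
--     # if there are 4 large operators, then enumerate gives us 0, 1, 2, 3.
--     # so final batch is the 4th
--     batch_dict = {}
--     last_i = len(matching)
--
--     for i, name in enumerate(matching):
--         batch_dict[i] = [name]
--
--     batch_dict[last_i] = remaining
--
--     return batch_dict
-- ===== SOURCE B (Python) =====
-- def determine_batches(rt_names: list) -> dict:
--     large_operator_names = [
--         "LA Metro Bus",
--         "LA Metro Rail",
--         "AC Transit",
--         "Muni"
--     ]
--     # Single pass: classify each name on the fly; matched names get their own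
--     # batch key as they are seen, the rest accumulate into the final batch.
--     batch_dict = {}
--     idx = 0
--     remaining = []
--     for name in rt_names:
--         if any(s in name for s in large_operator_names):
--             batch_dict[idx] = [name]
--             idx += 1
--         else:
--             remaining.append(name)
--     batch_dict[idx] = remaining
--     return batch_dict
-- ===== Notes on version B (the rewrite author's own statement) =====
-- stated objective: simpler
-- what changed: B replaces A's three passes (substring-filter to build matching, an O(n*m) membership filter for remaining, and an enumerate loop over matching) with one partitioning pass that assigns batch keys on the fly with a counter and accumulates the remainder.
import Mathlib
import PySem

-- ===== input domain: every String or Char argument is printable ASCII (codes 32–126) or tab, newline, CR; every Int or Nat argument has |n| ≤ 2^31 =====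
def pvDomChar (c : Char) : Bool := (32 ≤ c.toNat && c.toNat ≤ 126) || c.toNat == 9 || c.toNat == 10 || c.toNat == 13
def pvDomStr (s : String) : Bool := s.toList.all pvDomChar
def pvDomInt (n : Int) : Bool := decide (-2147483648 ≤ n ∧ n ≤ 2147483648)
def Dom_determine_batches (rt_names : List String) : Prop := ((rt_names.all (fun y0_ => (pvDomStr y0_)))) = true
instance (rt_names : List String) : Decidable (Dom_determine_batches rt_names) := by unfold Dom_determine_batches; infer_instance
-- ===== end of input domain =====

-- B fuses A's three passes (filter matching, membership-filter remaining, enumerate loop)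
-- into one partitioning pass with a running batch counter; objective: simpler (same result).

-- ===== PORT A =====
def pvLargeOperatorNames : List String :=
  ["LA Metro Bus", "LA Metro Rail", "AC Transit", "Muni"]

def determine_batches (rt_names : List String) : List (Int × List String) :=
  let matching := rt_names.filter (fun i =>
    pvLargeOperatorNames.any (fun name => PySem.Str.isIn name i))
  let remaining := rt_names.filter (fun i => !(matching.contains i))
  let last_i : Int := (matching.length : Int)
  let batch_dict : PySem.Dict Int (List String) :=
    (PySem.List.enumerate matching).foldl
      (fun d p => d.insert p.1 [p.2]) PySem.Dict.empty
  (batch_dict.insert last_i remaining).items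

-- ===== PORT B =====
def pvAltStep (st : PySem.Dict Int (List String) × Int × List String) (name : String) :
    PySem.Dict Int (List String) × Int × List String :=
  if pvLargeOperatorNames.any (fun s => PySem.Str.isIn s name) then
    (st.1.insert st.2.1 [name], st.2.1 + 1, st.2.2)
  else
    (st.1, st.2.1, st.2.2 ++ [name])

def determine_batches_alt (rt_names : List String) : List (Int × List String) :=
  let st := rt_names.foldl pvAltStep (PySem.Dict.empty, 0, [])
  (st.1.insert st.2.1 st.2.2).items

-- ===== PRECONDITION & SPEC =====
def Spec_determine_batches (rt_names : List String) (out : List (Int × List String)) : Prop := out = determine_batches_alt rt_names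
instance (rt_names : List String) (out : List (Int × List String)) : Decidable (Spec_determine_batches rt_names out) := by unfold Spec_determine_batches; infer_instance

-- ===== CLAIM (what is proved, stated in full; the proofs are below) =====
def Claim_equal_determine_batches : Prop := ∀ (rt_names : List String), Dom_determine_batches rt_names → Spec_determine_batches rt_names (determine_batches rt_names)

-- ===== LEMMAS AND PROOFS =====

-- shorthand for the match test (proof-side only)
def pvMatch (i : String) : Bool :=
  pvLargeOperatorNames.any (fun name => PySem.Str.isIn name i)

-- For i ∈ rt_names: i ∈ matching ↔ pvMatch i, so A's membership filter is the negated match filter.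
lemma pv_remaining_eq (rt_names : List String) :
    rt_names.filter (fun i => !((rt_names.filter pvMatch).contains i))
      = rt_names.filter (fun i => !(pvMatch i)) := by
  apply List.filter_congr
  intro x hx
  simp [List.mem_filter, hx]

-- B's loop from an arbitrary state = A's enumerate-fold of the matched prefix plus accumulators.
lemma pv_loop_eq (l : List String)
    (d0 : PySem.Dict Int (List String)) (i0 : Int) (r0 : List String) :
    l.foldl pvAltStep (d0, i0, r0)
      = ((PySem.List.enumerate (l.filter pvMatch) i0).foldl
            (fun d p => d.insert p.1 [p.2]) d0,
         i0 + ((l.filter pvMatch).length : Int),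
         r0 ++ l.filter (fun i => !(pvMatch i))) := by
  induction l generalizing d0 i0 r0 with
  | nil => simp [PySem.List.enumerate_nil]
  | cons x xs ih =>
    have hstep : pvAltStep (d0, i0, r0) x
        = if pvMatch x then (d0.insert i0 [x], i0 + 1, r0) else (d0, i0, r0 ++ [x]) := rfl
    cases hx : pvMatch x
    · rw [List.foldl_cons, hstep, hx, if_neg (by simp), ih]
      simp [hx]
    · rw [List.foldl_cons, hstep, hx, if_pos rfl, ih]
      refine Prod.ext ?_ (Prod.ext ?_ ?_)
      · simp [hx, PySem.List.enumerate_cons]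
      · simp only [List.filter_cons, hx]
        push_cast [List.length_cons]
        omega
      · simp only [List.filter_cons]
        rw [show (!pvMatch x) = false by simp [hx]]
        simp

-- ===== VERDICT (by name: the statement is the Claim_ definition above) =====
theorem determine_batches_spec : Claim_equal_determine_batches := by
  intro rt_names _
  unfold Spec_determine_batches determine_batches determine_batches_alt
  rw [pv_loop_eq]
  simp only [zero_add, List.nil_append]
  rw [show (fun i => pvLargeOperatorNames.any fun name => PySem.Str.isIn name i) = pvMatch from rfl,
    pv_remaining_eq]
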